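-- pv_equiv track=rewrite | github.com/AMnEPka/humorpedia | migration/extract_images.py | categorize_images
-- ===== SOURCE A (Python) =====
-- from collections import defaultdict
--
-- def categorize_images(image_paths):
--     """Categorize images by type"""
--     categories = defaultdict(list)
--
--     for path in image_paths:
--         if '/people/' in path:
--             categories['people'].append(path)
--         elif '/team/' in path or '/teams/' in path:
--             categories['teams'].append(path)
--         elif '/show/' in path or '/shows/' in path:
--             categories['shows'].append(path)
--         elif '/article/' in path or '/articles/' in path:
--             categories['articles'].append(path)
--         elif '/news/' in path:
--             categories['news'].append(path)
--         else:
--             categories['other'].append(path)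
--
--     return dict(categories)
-- ===== SOURCE B (Python) =====
-- def categorize_images(image_paths):
--     """Categorize images by type"""
--     rules = [
--         ('people', ['/people/']),
--         ('teams', ['/team/', '/teams/']),
--         ('shows', ['/show/', '/shows/']),
--         ('articles', ['/article/', '/articles/']),
--         ('news', ['/news/']),
--     ]
--
--     def classify(path):
--         for category, subs in rules:
--             if any(sub in path for sub in subs):
--                 return category
--         return 'other'
--
--     labels = [classify(p) for p in image_paths]
--     order = list(dict.fromkeys(labels))
--     return {c: [p for p, l in zip(image_paths, labels) if l == c]
--             for c in order}
-- ===== Notes on version B (the rewrite author's own statement) =====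
-- stated objective: idiomatic
-- what changed: Replaces the single-pass if/elif chain that appends into a defaultdict with a data-driven rules table: classify each path once, derive the key order with dict.fromkeys, then build the result category-major with one comprehension per category.
import Mathlib
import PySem

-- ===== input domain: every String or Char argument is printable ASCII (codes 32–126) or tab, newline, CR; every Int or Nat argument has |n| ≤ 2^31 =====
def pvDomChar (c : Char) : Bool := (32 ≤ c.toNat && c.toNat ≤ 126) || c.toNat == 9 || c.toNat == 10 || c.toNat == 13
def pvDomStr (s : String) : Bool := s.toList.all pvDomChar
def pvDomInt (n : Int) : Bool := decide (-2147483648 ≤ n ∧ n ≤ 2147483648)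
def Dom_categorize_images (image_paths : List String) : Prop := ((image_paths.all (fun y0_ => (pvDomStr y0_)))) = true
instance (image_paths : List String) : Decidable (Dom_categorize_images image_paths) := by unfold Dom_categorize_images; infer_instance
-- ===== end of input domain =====

-- B replaces A's if/elif chain into a defaultdict with a rules table, per-path classification
-- and a category-major regrouping (idiomatic decomposition; same cost).

-- ===== PORT A =====
def categorize_images (image_paths : List String) : List (String × List String) :=
  (image_paths.foldl (fun categories path =>
    if PySem.Str.isIn "/people/" path then categories.modify "people" [] (· ++ [path])
    else if PySem.Str.isIn "/team/" path || PySem.Str.isIn "/teams/" path then categories.modify "teams" [] (· ++ [path])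
    else if PySem.Str.isIn "/show/" path || PySem.Str.isIn "/shows/" path then categories.modify "shows" [] (· ++ [path])
    else if PySem.Str.isIn "/article/" path || PySem.Str.isIn "/articles/" path then categories.modify "articles" [] (· ++ [path])
    else if PySem.Str.isIn "/news/" path then categories.modify "news" [] (· ++ [path])
    else categories.modify "other" [] (· ++ [path]))
    PySem.Dict.empty).items

-- ===== PORT B =====
def pvRules : List (String × List String) :=
  [("people", ["/people/"]),
   ("teams", ["/team/", "/teams/"]),
   ("shows", ["/show/", "/shows/"]),
   ("articles", ["/article/", "/articles/"]),
   ("news", ["/news/"])]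

def pvClassify (path : String) : String :=
  match pvRules.find? (fun r => r.2.any (fun sub => PySem.Str.isIn sub path)) with
  | some r => r.1
  | none => "other"

def categorize_images_alt (image_paths : List String) : List (String × List String) :=
  let labels := image_paths.map pvClassify
  let order := PySem.List.dedup labels
  order.map (fun c => (c, ((image_paths.zip labels).filter (fun pl => pl.2 == c)).map (·.1)))

-- ===== PRECONDITION & SPEC =====
def Spec_categorize_images (image_paths : List String) (out : List (String × List String)) : Prop := out = categorize_images_alt image_paths
instance (image_paths : List String) (out : List (String × List String)) : Decidable (Spec_categorize_images image_paths out) := by unfold Spec_categorize_images; infer_instance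

-- ===== CLAIM (what is proved, stated in full; the proofs are below) =====
def Claim_equal_categorize_images : Prop := ∀ (image_paths : List String), Dom_categorize_images image_paths → Spec_categorize_images image_paths (categorize_images image_paths)

-- ===== LEMMAS AND PROOFS =====

-- A's loop body is exactly a modify at the category pvClassify computes.
lemma step_eq (d : PySem.Dict String (List String)) (path : String) :
    (if PySem.Str.isIn "/people/" path then d.modify "people" [] (· ++ [path])
    else if PySem.Str.isIn "/team/" path || PySem.Str.isIn "/teams/" path then d.modify "teams" [] (· ++ [path])
    else if PySem.Str.isIn "/show/" path || PySem.Str.isIn "/shows/" path then d.modify "shows" [] (· ++ [path])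
    else if PySem.Str.isIn "/article/" path || PySem.Str.isIn "/articles/" path then d.modify "articles" [] (· ++ [path])
    else if PySem.Str.isIn "/news/" path then d.modify "news" [] (· ++ [path])
    else d.modify "other" [] (· ++ [path]))
    = d.modify (pvClassify path) [] (· ++ [path]) := by
  simp only [pvClassify, pvRules, List.find?, List.any_cons, List.any_nil, Bool.or_false, PySem.Str.isIn_eq, show ("/people/".toList = ['/','p','e','o','p','l','e','/']) from rfl, show ("/team/".toList = ['/','t','e','a','m','/']) from rfl, show ("/teams/".toList = ['/','t','e','a','m','s','/']) from rfl, show ("/show/".toList = ['/','s','h','o','w','/']) from rfl, show ("/shows/".toList = ['/','s','h','o','w','s','/']) from rfl, show ("/article/".toList = ['/','a','r','t','i','c','l','e','/']) from rfl, show ("/articles/".toList = ['/','a','r','t','i','c','l','e','s','/']) from rfl, show ("/news/".toList = ['/','n','e','w','s','/']) from rfl]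
  split_ifs with h1 h2 h3 h4 h5
  · simp [h1]
  · simp [h1, h2]
  · simp [h1, h2, h3]
  · simp [h1, h2, h3, h4]
  · simp [h1, h2, h3, h4, h5]
  · simp [h1, h2, h3, h4, h5]

-- the grouped values coincide: selecting by classified key equals the zip/filter comprehension
lemma group_eq (xs : List String) (c : String) :
    ((xs.map (fun p => (pvClassify p, p))).filter (fun q => q.1 == c)).map (·.2)
    = ((xs.zip (xs.map pvClassify)).filter (fun pl => pl.2 == c)).map (·.1) := by
  induction xs with
  | nil => rfl
  | cons x t ih =>
      simp only [List.map_cons, List.zip_cons_cons, List.filter_cons]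
      by_cases h : pvClassify x = c <;> simp [h, ih]

-- ===== VERDICT (by name: the statement is the Claim_ definition above) =====
theorem categorize_images_spec : Claim_equal_categorize_images := by
  intro xs _
  show categorize_images xs = categorize_images_alt xs
  unfold categorize_images categorize_images_alt
  have hfold : xs.foldl (fun categories path =>
      if PySem.Str.isIn "/people/" path then categories.modify "people" [] (· ++ [path])
      else if PySem.Str.isIn "/team/" path || PySem.Str.isIn "/teams/" path then categories.modify "teams" [] (· ++ [path])
      else if PySem.Str.isIn "/show/" path || PySem.Str.isIn "/shows/" path then categories.modify "shows" [] (· ++ [path])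
      else if PySem.Str.isIn "/article/" path || PySem.Str.isIn "/articles/" path then categories.modify "articles" [] (· ++ [path])
      else if PySem.Str.isIn "/news/" path then categories.modify "news" [] (· ++ [path])
      else categories.modify "other" [] (· ++ [path])) PySem.Dict.empty
      = (xs.map (fun p => (pvClassify p, p))).foldl
          (fun d q => d.modify q.1 [] (· ++ [q.2])) PySem.Dict.empty := by
    rw [List.foldl_map]
    exact PySem.List.foldl_congr_mem _ _ _ _ (fun d p _ => step_eq d p)
  rw [hfold]
  set l := xs.map (fun p => (pvClassify p, p)) with hl
  have hnd : ((l.foldl (fun d q => d.modify q.1 [] (· ++ [q.2])) PySem.Dict.empty).keys).Nodup :=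
    PySem.Dict.nodup_keys_foldl_modify_key l (·.1) [] (fun _ q => (· ++ [q.2])) PySem.Dict.empty
      (by simp [PySem.Dict.keys_empty])
  have hkeys : (l.foldl (fun d q => d.modify q.1 [] (· ++ [q.2])) PySem.Dict.empty).keys
      = PySem.Set.ofList (xs.map pvClassify) := by
    rw [PySem.Dict.keys_foldl_modify_key l (·.1) [] (fun _ q => (· ++ [q.2])) PySem.Dict.empty]
    simp [hl, PySem.Dict.keys_empty, PySem.Set.update_nil_left, List.map_map, Function.comp_def]
  rw [PySem.Dict.items_eq_map_keys _ hnd ([] : List String), hkeys]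
  simp only [← PySem.List.dedup_eq_ofList]
  apply List.map_congr_left
  intro c _
  have := PySem.Dict.getD_foldl_modify_append (d := (PySem.Dict.empty : PySem.Dict String (List String))) (l := l) (c := c)
  rw [this]
  simp only [PySem.Dict.getD_empty, List.nil_append, hl]
  exact congrArg _ (group_eq xs c)
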